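-- pv_equiv track=rewrite | github.com/ajnoah21/Python-Fundamentals | CS0Fall23/kattis/seven_wonders/seven_wonders.py | solution
-- ===== SOURCE A (Python) =====
-- def solution(line):
--     cards = {}
--     for ch in line:
--         if ch in cards:
--             cards[ch] += 1
--         else:
--             cards[ch] = 1
--
--     sets=0
--     if( 'T' in cards and 'C' in cards and 'G' in cards):
--         sets = min([cards['T'], cards['C'], cards['G']])
--
--     score = 0
--     for value in cards.values():
--         score += value**2
--     score += sets*7
--
--     return score
-- ===== SOURCE B (Python) =====
-- def solution(line):
--     s = sorted(line)
--     score = 0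
--     t = c = g = 0
--     i = 0
--     n = len(s)
--     while i < n:
--         j = i + 1
--         while j < n and s[j] == s[i]:
--             j += 1
--         run = j - i
--         score += run * run
--         if s[i] == 'T':
--             t = run
--         elif s[i] == 'C':
--             c = run
--         elif s[i] == 'G':
--             g = run
--         i = j
--     if t and c and g:
--         score += 7 * min(t, c, g)
--     return score
-- ===== Notes on version B (the rewrite author's own statement) =====
-- stated objective: alternative
-- what changed: Replaces A's frequency-dict counting pass by sort-then-scan: sort the characters, walk the sorted list once measuring run lengths (each run length is that character's count), summing run^2 and recording the T/C/G runs for the bonus.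
import Mathlib
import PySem

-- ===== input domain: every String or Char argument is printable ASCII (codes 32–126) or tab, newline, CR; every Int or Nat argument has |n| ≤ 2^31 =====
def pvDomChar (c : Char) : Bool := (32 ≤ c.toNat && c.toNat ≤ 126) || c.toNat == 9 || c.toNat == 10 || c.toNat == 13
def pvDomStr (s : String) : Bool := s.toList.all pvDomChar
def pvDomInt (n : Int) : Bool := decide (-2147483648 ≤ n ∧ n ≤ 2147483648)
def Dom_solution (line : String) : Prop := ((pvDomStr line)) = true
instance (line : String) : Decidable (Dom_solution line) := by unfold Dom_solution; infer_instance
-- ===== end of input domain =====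

-- B replaces A's frequency-dict pass by sort-then-scan over runs of equal characters (alternative algorithm, not faster).

-- ===== PORT A =====
def solution (line : String) : Int :=
  let cards : PySem.Dict Char Int := line.toList.foldl (fun d ch =>
    match d.get? ch with          -- 'if ch in cards: cards[ch] += 1 else: cards[ch] = 1'
    | some v => d.insert ch (v + 1)
    | none   => d.insert ch 1) PySem.Dict.empty
  let sets : Int :=
    if cards.contains 'T' && cards.contains 'C' && cards.contains 'G' then
      -- reads cards['T'] etc. under the contains guard, so get? is always some; .getD 0 is never taken
      (PySem.List.min? [(cards.get? 'T').getD 0, (cards.get? 'C').getD 0, (cards.get? 'G').getD 0]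
        (fun x => x)).getD 0
    else 0
  let score : Int := cards.values.foldl (fun acc v => acc + v ^ 2) 0
  score + sets * 7

-- ===== PORT B =====
-- the outer 'while i < n' loop of Source B: one step per run of equal characters; the inner
-- 'while j < n and s[j] == s[i]' scan is the takeWhile, 'i = j' is the dropWhile tail
def runLoop : List Char → Int × Int × Int × Int → Int × Int × Int × Int
  | [], acc => acc
  | ch :: rest, (score, t, c, g) =>
      let run : Int := ((rest.takeWhile (fun x => x == ch)).length : Int) + 1
      let score' := score + run * run
      runLoop (rest.dropWhile (fun x => x == ch))
        (if ch == 'T' then (score', run, c, g)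
         else if ch == 'C' then (score', t, run, g)
         else if ch == 'G' then (score', t, c, run)
         else (score', t, c, g))
termination_by s _ => s.length
decreasing_by simpa using Nat.lt_succ_of_le (List.length_dropWhile_le _ _)

def solution_alt (line : String) : Int :=
  let s := PySem.List.sorted line.toList (fun x => x) false
  match runLoop s (0, 0, 0, 0) with
  | (score, t, c, g) =>
      if t != 0 && c != 0 && g != 0 then score + 7 * min t (min c g) else score

-- ===== PRECONDITION & SPEC =====
def Spec_solution (line : String) (out : Int) : Prop := out = solution_alt line
instance (line : String) (out : Int) : Decidable (Spec_solution line out) := by unfold Spec_solution; infer_instance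

-- ===== CLAIM (what is proved, stated in full; the proofs are below) =====
def Claim_equal_solution : Prop := ∀ (line : String), Dom_solution line → Spec_solution line (solution line)

-- ===== LEMMAS AND PROOFS =====

-- recursive spec: peel off all copies of the first character, add (its count)², recurse
def S : List Char → Int
  | [] => 0
  | ch :: rest =>
      ((rest.count ch : Int) + 1) * ((rest.count ch : Int) + 1)
        + S (rest.filter (fun x => x != ch))
termination_by s => s.length
decreasing_by simpa using Nat.lt_succ_of_le (List.length_filter_le _ _)

-- on a sorted tail all copies of the head are the leading run
theorem sorted_run (ch : Char) (rest : List Char)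
    (hlb : ∀ x ∈ rest, ch ≤ x) (hp : rest.Pairwise (· ≤ ·)) :
    (rest.takeWhile (fun x => x == ch)).length = rest.count ch ∧
    rest.dropWhile (fun x => x == ch) = rest.filter (fun x => x != ch) := by
  induction rest with
  | nil => simp
  | cons x xs ih =>
    rcases List.pairwise_cons.mp hp with ⟨hxle, hp'⟩
    by_cases h : x = ch
    · subst h
      have := ih (fun y hy => hlb y (List.mem_cons_of_mem _ hy)) hp'
      simp [this.1, this.2]
    · have hne : ∀ y ∈ xs, y ≠ ch := by
        intro y hy hyc
        exact h (le_antisymm (hyc ▸ hxle y hy) (hlb x (List.mem_cons_self)))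
      have hx : (x == ch) = false := by simp [h]
      constructor
      · simp [hx, h, List.count_eq_zero.mpr (fun hc => hne ch hc rfl)]
      · simp only [List.dropWhile_cons, hx, Bool.false_eq_true, if_false, List.filter_cons]
        rw [if_pos (by simp [h]), List.filter_eq_self.mpr (fun y hy => by simpa using hne y hy)]

-- characterisation of the run loop on a sorted list
theorem runLoop_eq : ∀ (n : Nat) (s : List Char), s.length ≤ n → s.Pairwise (· ≤ ·) →
    ∀ (a t0 c0 g0 : Int),
    runLoop s (a, t0, c0, g0) =
      (a + S s,
       if 'T' ∈ s then ((s.count 'T' : Int)) else t0,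
       if 'C' ∈ s then ((s.count 'C' : Int)) else c0,
       if 'G' ∈ s then ((s.count 'G' : Int)) else g0) := by
  intro n
  induction n with
  | zero =>
    intro s hl _ a t0 c0 g0
    have : s = [] := List.eq_nil_of_length_eq_zero (Nat.le_zero.mp hl)
    subst this
    simp [runLoop, S]
  | succ n ih =>
    intro s hl hp a t0 c0 g0
    match s with
    | [] => simp [runLoop, S]
    | ch :: rest =>
      rcases List.pairwise_cons.mp hp with ⟨hlb, hp'⟩
      obtain ⟨htake, hdrop⟩ := sorted_run ch rest hlb hp'
      have hlen : (rest.filter (fun x => x != ch)).length ≤ n := by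
        have := List.length_filter_le (fun x => x != ch) rest
        simp at hl; omega
      have hmem : ∀ k : Char, k ≠ ch →
          (k ∈ rest.filter (fun x => x != ch) ↔ k ∈ rest) := by
        intro k hk; simp [List.mem_filter, hk]
      have hcnt : ∀ k : Char, k ≠ ch →
          (rest.filter (fun x => x != ch)).count k = rest.count k :=
        fun k hk => List.count_filter (by simp [hk])
      have hnotmem : ch ∉ rest.filter (fun x => x != ch) := by simp [List.mem_filter]
      rw [runLoop, htake, hdrop,
        ih _ hlen (hp'.filter _)]
      by_cases hT : ch = 'T' <;> by_cases hC : ch = 'C' <;> by_cases hG : ch = 'G' <;>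
        simp_all [Prod.ext_iff, List.mem_filter, S]
      repeat' constructor
      all_goals try ring
      all_goals split_ifs <;> first | rfl | (exfalso; simp only [eq_comm] at *; tauto)

-- S equals the sum of squared counts over any duplicate-free enumeration of the characters
theorem S_eq_sum : ∀ (n : Nat) (xs L : List Char), xs.length ≤ n → L.Nodup →
    (∀ k, k ∈ L ↔ k ∈ xs) →
    S xs = (L.map (fun k => ((xs.count k : Int)) * (xs.count k))).sum := by
  intro n
  induction n with
  | zero =>
    intro xs L hl hnd hmem
    have hxs : xs = [] := List.eq_nil_of_length_eq_zero (Nat.le_zero.mp hl)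
    subst hxs
    have hL : L = [] := List.eq_nil_iff_forall_not_mem.mpr (fun k hk => by simpa using (hmem k).mp hk)
    subst hL
    simp [S]
  | succ n ih =>
    intro xs L hl hnd hmem
    match xs with
    | [] =>
      have hL : L = [] := List.eq_nil_iff_forall_not_mem.mpr (fun k hk => by simpa using (hmem k).mp hk)
      subst hL
      simp [S]
    | ch :: rest =>
      have hchL : ch ∈ L := (hmem ch).mpr (List.mem_cons_self)
      have hperm : L.Perm (ch :: L.erase ch) := List.perm_cons_erase hchL
      set f := fun k => ((((ch :: rest).count k : Int)) * ((ch :: rest).count k))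
      have hsum : (L.map f).sum = ((ch :: L.erase ch).map f).sum :=
        (hperm.map f).sum_eq
      have hrec := ih (rest.filter (fun x => x != ch)) (L.erase ch)
        (le_trans (List.length_filter_le _ _) (by simpa using hl))
        (hnd.erase ch)
        (by
          intro k
          rw [hnd.mem_erase_iff, hmem k]
          simp [List.mem_filter, List.mem_cons]
          tauto)
      have hcnt : ∀ k ∈ L.erase ch,
          ((ch :: rest).count k) = (rest.filter (fun x => x != ch)).count k := by
        intro k hk
        have hkch : k ≠ ch := (hnd.mem_erase_iff.mp hk).1
        rw [List.count_filter (by simpa using hkch)]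
        simp [List.count_cons]
        exact Ne.symm hkch
      rw [hsum, S, hrec]
      simp only [List.map_cons, List.sum_cons]
      have : (L.erase ch).map f
          = (L.erase ch).map (fun k => (((rest.filter (fun x => x != ch)).count k : Int))
              * ((rest.filter (fun x => x != ch)).count k)) :=
        List.map_congr_left (fun k hk => by simp [f, hcnt k hk])
      rw [this]
      have hfch : f ch = ((rest.count ch : Int) + 1) * ((rest.count ch : Int) + 1) := by
        simp [f, List.count_cons_self]
      rw [hfch]

-- A's counting loop builds exactly collections.Counter(line)
theorem fold_eq_counter (xs : List Char) :
    xs.foldl (fun (d : PySem.Dict Char Int) ch =>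
      match d.get? ch with
      | some v => d.insert ch (v + 1)
      | none   => d.insert ch 1) PySem.Dict.empty = PySem.Dict.counter xs := by
  rw [← PySem.Dict.foldl_insert_getD_add_one_eq_counter]
  apply PySem.List.foldl_congr_mem
  intro d ch _
  cases h : d.get? ch with
  | some v => simp [PySem.Dict.getD, h]
  | none => simp [PySem.Dict.getD, h]

-- Python's min(t, c, g) read off A's min?-over-a-list form
theorem min3 (a b c : Int) : (PySem.List.min? [a, b, c] (fun x => x)).getD 0 = min a (min b c) := by
  simp only [PySem.List.min?, List.foldl_cons, List.foldl_nil]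
  split_ifs <;> simp <;> split_ifs <;> simp <;> omega

-- ===== VERDICT (by name: the statement is the Claim_ definition above) =====
theorem solution_spec : Claim_equal_solution := by
  intro line _
  show solution line = solution_alt line
  unfold solution solution_alt
  rw [fold_eq_counter]
  have hsp : (PySem.List.sorted line.toList (fun x => x) false).Pairwise (· ≤ ·) := by
    simpa using PySem.List.sorted_pairwise line.toList (fun x => x)
  have hperm := PySem.List.sorted_perm line.toList (fun x => x) false
  set s := PySem.List.sorted line.toList (fun x => x) false with hsdef
  dsimp only []
  rw [runLoop_eq s.length s le_rfl hsp 0 0 0 0]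
  have hcount : ∀ k, s.count k = line.toList.count k := fun k => hperm.count_eq k
  have hmem : ∀ k : Char, k ∈ s ↔ k ∈ line.toList := fun k =>
    PySem.List.mem_sorted line.toList (fun x => x) false k
  have hS := S_eq_sum s.length s (PySem.Set.ofList line.toList) le_rfl
    (PySem.Set.nodup_ofList _)
    (fun k => by rw [PySem.Set.mem_ofList, hmem k])
  have hval : (PySem.Dict.counter line.toList).values
      = (PySem.Set.ofList line.toList).map (fun k => (line.toList.count k : Int)) := by
    rw [PySem.Dict.values_eq_map_keys _ (PySem.Dict.nodup_keys_counter _) 0,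
        PySem.Dict.keys_counter]
    exact List.map_congr_left (fun k _ => PySem.Dict.getD_counter _ _)
  have hscore : (PySem.Dict.counter line.toList).values.foldl (fun acc v => acc + v ^ 2) 0
      = S s := by
    rw [PySem.List.foldl_add _ (fun v => v ^ 2) 0, hval, List.map_map, hS]
    rw [List.map_congr_left (fun k _ => by
      simp [pow_two, hcount k] :
      ∀ k ∈ PySem.Set.ofList line.toList,
        ((fun v => v ^ 2) ∘ fun k => ((line.toList.count k : Int))) k
          = (fun k => ((s.count k : Int)) * (s.count k)) k)]
    ring
  have hget : ∀ q : Char, (((PySem.Dict.counter line.toList).get? q).getD 0)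
      = (line.toList.count q : Int) := fun q => by
    rw [← PySem.Dict.getD_eq_get?_getD, PySem.Dict.getD_counter]
  simp only [hscore, hget, min3, PySem.Dict.contains_counter, zero_add]
  by_cases h1 : 'T' ∈ line.toList <;> by_cases h2 : 'C' ∈ line.toList <;>
    by_cases h3 : 'G' ∈ line.toList
  · have p1 : 0 < line.toList.count 'T' := List.count_pos_iff.mpr h1
    have p2 : 0 < line.toList.count 'C' := List.count_pos_iff.mpr h2
    have p3 : 0 < line.toList.count 'G' := List.count_pos_iff.mpr h3
    simp [h1, h2, h3, hmem, hcount]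
    rw [if_pos ⟨⟨by omega, by omega⟩, by omega⟩]
    ring
  all_goals simp [h1, h2, h3, hmem, hcount]
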